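-- pv_equiv track=rewrite | github.com/URSA-MATH/URSA-MATH | inference/prm_infer_score.py | split_array_projection
-- ===== SOURCE A (Python) =====
-- def split_array_projection(array, x, l):
--     n = len(array)
--     base_length = n // x
--     k, m = divmod(base_length, l)
--     split_indices = [(i * k + min(i, m), (i + 1) * k + min(i + 1, m)) for i in range(l)]
--     projected_indices = [(start * x, end * x) for start, end in split_indices]
--     result = [array[start:end] for start, end in projected_indices]
--
--     return result
-- ===== SOURCE B (Python) =====
-- def split_array_projection(array, x, l):
--     k, m = divmod(len(array) // x, l)
--     result = []
--     rest = array
--     for i in range(l):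
--         size = (k + 1 if i < m else k) * x
--         result.append(rest[:size])
--         rest = rest[size:]
--     return result
-- ===== Notes on version B (the rewrite author's own statement) =====
-- stated objective: alternative
-- what changed: Replaced A's precomputed boundary-index tables and absolute-index slicing by a loop that peels each chunk off the front of the remaining list with prefix-take/suffix-drop, never computing absolute positions; this trades speed for the index-free decomposition (re-slicing the remainder copies it, so B is slower on large inputs).
-- outside the precondition, e.g. on split_array_projection([1, 2], 0, 2): A raises ZeroDivisionError, B raises ZeroDivisionError; on split_array_projection([1, 2], 1, 0): A raises ZeroDivisionError, B raises ZeroDivisionError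
import Mathlib
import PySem

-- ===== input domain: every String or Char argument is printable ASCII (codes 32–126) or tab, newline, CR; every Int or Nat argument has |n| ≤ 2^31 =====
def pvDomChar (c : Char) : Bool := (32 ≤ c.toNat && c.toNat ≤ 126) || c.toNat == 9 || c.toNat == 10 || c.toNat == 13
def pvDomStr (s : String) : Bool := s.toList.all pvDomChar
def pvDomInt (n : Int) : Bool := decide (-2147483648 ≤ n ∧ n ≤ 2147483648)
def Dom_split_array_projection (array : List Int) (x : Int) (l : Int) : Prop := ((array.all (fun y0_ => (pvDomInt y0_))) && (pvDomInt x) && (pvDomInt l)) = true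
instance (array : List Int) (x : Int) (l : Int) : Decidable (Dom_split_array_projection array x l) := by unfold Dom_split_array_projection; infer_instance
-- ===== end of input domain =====

-- B replaces A's precomputed index tables and slicing into the original array by a loop
-- that peels each chunk off the front of the remaining list with prefix-take / suffix-drop
-- (objective: alternative; the repeated re-slicing of the remainder makes B slower on large inputs).

-- ===== PORT A =====
def split_array_projection (array : List Int) (x : Int) (l : Int) : List (List Int) :=
  let n : Int := array.length
  let base_length := PySem.Int.floordiv n x
  let k := PySem.Int.floordiv base_length l
  let m := PySem.Int.mod base_length l
  let split_indices := (PySem.List.pyRange 0 l 1).map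
    (fun i => (i * k + min i m, (i + 1) * k + min (i + 1) m))
  let projected_indices := split_indices.map (fun p => (p.1 * x, p.2 * x))
  projected_indices.map (fun p => PySem.List.slice array (some p.1) (some p.2))

-- ===== PORT B =====
-- one iteration of Source B's loop: state = (result, rest); peel the i-th chunk off the front of rest
def pvChunkStep (k m x : Int) (st : List (List Int) × List Int) (i : Int) :
    List (List Int) × List Int :=
  let size := (if i < m then k + 1 else k) * x
  (st.1 ++ [PySem.List.slice st.2 none (some size)],
   PySem.List.slice st.2 (some size) none)

def split_array_projection_alt (array : List Int) (x : Int) (l : Int) : List (List Int) :=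
  let k := PySem.Int.floordiv (PySem.Int.floordiv (array.length : Int) x) l
  let m := PySem.Int.mod (PySem.Int.floordiv (array.length : Int) x) l
  ((PySem.List.pyRange 0 l 1).foldl (pvChunkStep k m x) ([], array)).1

-- ===== PRECONDITION & SPEC =====
-- Python A raises ZeroDivisionError when x = 0 (n // x) or l = 0 (divmod(base_length, l)); B raises there too.
def Pre_split_array_projection (array : List Int) (x : Int) (l : Int) : Prop := x ≠ 0 ∧ l ≠ 0
instance (array : List Int) (x : Int) (l : Int) : Decidable (Pre_split_array_projection array x l) := by unfold Pre_split_array_projection; infer_instance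
def pvWitness_split_array_projection : List Int × Int × Int := ([1, 2, 3, 4, 5, 6], 2, 2)

def Spec_split_array_projection (array : List Int) (x : Int) (l : Int) (out : List (List Int)) : Prop := out = split_array_projection_alt array x l
instance (array : List Int) (x : Int) (l : Int) (out : List (List Int)) : Decidable (Spec_split_array_projection array x l out) := by unfold Spec_split_array_projection; infer_instance

-- ===== CLAIM =====
def Claim_equal_split_array_projection : Prop := ∀ (array : List Int) (x : Int) (l : Int), Dom_split_array_projection array x l → Pre_split_array_projection array x l → Spec_split_array_projection array x l (split_array_projection array x l)

-- ===== LEMMAS AND PROOFS =====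

-- boundary arithmetic: A's (i+1)-th boundary is the i-th boundary plus Source B's chunk size
theorem pvBoundary_step (i k m : Int) :
    ((i + 1) * k + min (i + 1) m) = (i * k + min i m) + (if i < m then k + 1 else k) := by
  have h1 : (i + 1) * k = i * k + k := by ring
  rcases lt_or_ge i m with h | h
  · rw [if_pos h, min_eq_left (by omega), min_eq_left (by omega)]; omega
  · rw [if_neg (by omega), min_eq_right (by omega), min_eq_right (by omega)]; omega

-- main invariant: Source B's loop, resumed at step i on the remainder after A's i-th projected
-- boundary, appends exactly A's remaining chunks to the accumulated result
theorem pvFold_eq (array : List Int) (k m x l : Int)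
    (Hsz : ∀ j : Int, 0 ≤ j → j < l → 0 ≤ (if j < m then k + 1 else k) * x)
    (Hp : ∀ j : Int, 0 ≤ j → j ≤ l → 0 ≤ (j * k + min j m) * x) :
    ∀ (cnt : Nat) (i : Int) (acc : List (List Int)), 0 ≤ i → (l - i).toNat = cnt →
      ((PySem.List.pyRange i l 1).foldl (pvChunkStep k m x)
          (acc, array.drop ((i * k + min i m) * x).toNat)).1
        = acc ++ (PySem.List.pyRange i l 1).map
            (fun j => PySem.List.slice array (some ((j * k + min j m) * x))
                (some (((j + 1) * k + min (j + 1) m) * x))) := by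
  intro cnt
  induction cnt with
  | zero =>
      intro i acc _ h
      rw [PySem.List.pyRange_one_eq_nil (by omega)]
      simp
  | succ n ih =>
      intro i acc hi h
      have hil : i < l := by omega
      rw [PySem.List.pyRange_one_cons hil, List.foldl_cons]
      set p := (i * k + min i m) * x with hp
      set sz := (if i < m then k + 1 else k) * x with hsz
      have hq : ((i + 1) * k + min (i + 1) m) * x = p + sz := by
        rw [hp, hsz, pvBoundary_step i k m]; ring
      have hp0 : 0 ≤ p := Hp i hi (by omega)
      have hsz0 : 0 ≤ sz := Hsz i hi hil
      have hhead : PySem.List.slice (array.drop p.toNat) none (some sz)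
          = PySem.List.slice array (some p) (some (((i + 1) * k + min (i + 1) m) * x)) := by
        rw [PySem.List.slice_to _ hsz0,
            PySem.List.slice_toNat array hp0 (b := ((i + 1) * k + min (i + 1) m) * x) (by rw [hq]; omega)]
        rw [hq]
        congr 1
        omega
      have htail : PySem.List.slice (array.drop p.toNat) (some sz)
          = array.drop ((((i + 1) * k + min (i + 1) m)) * x).toNat := by
        rw [PySem.List.slice_from _ hsz0, List.drop_drop]
        congr 1
        rw [hq]; omega
      have hstep : pvChunkStep k m x (acc, array.drop p.toNat) i
          = (acc ++ [PySem.List.slice array (some p) (some (((i + 1) * k + min (i + 1) m) * x))],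
             array.drop ((((i + 1) * k + min (i + 1) m)) * x).toNat) := by
        simp only [pvChunkStep, ← hsz, hhead, htail]
      rw [hstep, ih (i + 1) _ (by omega) (by omega)]
      rw [List.map_cons, hp]
      simp [List.append_assoc]

-- ===== VERDICT =====
theorem split_array_projection_spec : Claim_equal_split_array_projection := by
  intro array x l _ hpre
  unfold Spec_split_array_projection split_array_projection split_array_projection_alt
  simp only [List.map_map]
  rcases lt_trichotomy l 0 with hl | hl | hl
  · rw [PySem.List.pyRange_one_eq_nil (by omega)]
    simp
  · exact absurd hl hpre.2
  · set n : Int := (array.length : Int) with hn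
    have hn0 : 0 ≤ n := by positivity
    set bl := PySem.Int.floordiv n x with hbl
    set k := PySem.Int.floordiv bl l with hk
    set m := PySem.Int.mod bl l with hm
    have hm0 : 0 ≤ m := hm ▸ PySem.Int.mod_nonneg bl hl
    have hml : m < l := hm ▸ PySem.Int.mod_lt bl hl
    have hkl : k * l + m = bl := by rw [hk, hm]; exact PySem.Int.floordiv_mul_add_mod bl l
    -- sign facts split on the sign of x
    have hsigns : (0 < x ∧ 0 ≤ bl ∧ 0 ≤ k) ∨ (x < 0 ∧ bl ≤ 0 ∧ k ≤ 0) := by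
      rcases lt_trichotomy x 0 with hx | hx | hx
      · right
        refine ⟨hx, ?_, ?_⟩
        · have hd := PySem.Int.floordiv_mul_add_mod n x
          have hb := PySem.Int.mod_neg_bounds n hx
          nlinarith [hbl ▸ hd]
        · have : bl ≤ 0 := by
            have hd := PySem.Int.floordiv_mul_add_mod n x
            have hb := PySem.Int.mod_neg_bounds n hx
            nlinarith [hbl ▸ hd]
          nlinarith
      · exact absurd hx hpre.1
      · left
        refine ⟨hx, ?_, ?_⟩
        · rw [hbl, PySem.Int.floordiv_eq_ediv_of_pos hx]
          exact Int.ediv_nonneg hn0 (by omega)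
        · have : 0 ≤ bl := by
            rw [hbl, PySem.Int.floordiv_eq_ediv_of_pos hx]
            exact Int.ediv_nonneg hn0 (by omega)
          rw [hk, PySem.Int.floordiv_eq_ediv_of_pos hl]
          exact Int.ediv_nonneg this (by omega)
    have Hsz : ∀ j : Int, 0 ≤ j → j < l → 0 ≤ (if j < m then k + 1 else k) * x := by
      intro j hj hjl
      rcases hsigns with ⟨hx, _, hk0⟩ | ⟨hx, hbl0, hk0⟩
      · split_ifs <;> positivity
      · have hfac : (if j < m then k + 1 else k) ≤ 0 := by
          split_ifs with hjm
          · have hm1 : 1 ≤ m := by omega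
            have : k ≠ 0 := by intro h0; rw [h0] at hkl; omega
            omega
          · exact hk0
        nlinarith
    have Hp : ∀ j : Int, 0 ≤ j → j ≤ l → 0 ≤ (j * k + min j m) * x := by
      intro j hj hjl
      rcases hsigns with ⟨hx, _, hk0⟩ | ⟨hx, hbl0, hk0⟩
      · have : 0 ≤ min j m := le_min hj hm0
        positivity
      · have hfac : j * k + min j m ≤ 0 := by
          rcases eq_or_lt_of_le hk0 with hk1 | hk1
          · have hkl' := hkl
            rw [hk1, zero_mul] at hkl'
            have hm0' : m = 0 := by omega
            have : min j m = 0 := by rw [hm0']; exact min_eq_right hj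
            nlinarith
          · have h1 : j * k ≤ j * (-1) := by nlinarith
            have h2 : min j m ≤ j := min_le_left j m
            nlinarith
        nlinarith
    have hz : ((0 : Int) * k + min 0 m) * x = 0 := by
      rw [min_eq_left hm0]; ring
    have hmain := pvFold_eq array k m x l Hsz Hp (l - 0).toNat 0 [] le_rfl rfl
    rw [hz, Int.toNat_zero, List.drop_zero] at hmain
    rw [hmain]
    simp [Function.comp]
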